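-- pv_equiv track=rewrite | github.com/juantoniolloretegea/SV-matematica-semantica | documentos/gobierno_determinista_ia/coleccion_I/documento_1/laboratorio/convergencia_ternaria_sv_release2.py | delta_N
-- ===== SOURCE A (Python) =====
-- from typing import Optional
--
-- Tri = Optional[int]
--
-- def convergencia_posicion(frames: list[list[Tri]], pos: int) -> tuple[bool, int|None, int|None]:
--     vals = [f[pos] for f in frames]
--     try:
--         n0 = next(i for i,v in enumerate(vals) if v is None)
--     except StopIteration:
--         return True, 0, 0
--     for n in range(n0, len(vals)):
--         if vals[n] is not None and all(v == vals[n] for v in vals[n:]):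
--             return True, n, n-n0
--     return False, None, None
--
-- def delta_N(frames: list[list[Tri]], irr: set[int]) -> int:
--     ds = []
--     for i in range(len(frames[0])):
--         if i in irr:
--             continue
--         ok, _, d = convergencia_posicion(frames, i)
--         if d is not None:
--             ds.append(d)
--     return max(ds) if ds else 0
-- ===== SOURCE B (Python) =====
-- def delta_N(frames, irr):
--     best = 0
--     nrows = len(frames)
--     for i in range(len(frames[0])):
--         if i in irr:
--             continue
--         vals = [f[i] for f in frames]
--         last = vals[-1]
--         if last is None:
--             continue  # the suffix can never be a constant non-None value
--         # k = length of the maximal constant suffix equal to `last` (one backward scan)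
--         k = 0
--         for v in reversed(vals):
--             if v == last:
--                 k += 1
--             else:
--                 break
--         m = nrows - k  # start of that suffix
--         # n0 = first None position, if any
--         n0 = None
--         for j, v in enumerate(vals):
--             if v is None:
--                 n0 = j
--                 break
--         if n0 is None:
--             d = 0
--         else:
--             d = m - n0 if m > n0 else 0
--         if d > best:
--             best = d
--     return best
-- ===== Notes on version B (the rewrite author's own statement) =====
-- stated objective: faster
-- what changed: Per position, instead of trying every candidate frame n and re-scanning the whole suffix vals[n:] (quadratic in the number of frames), B does one backward scan to find the start of the maximal constant non-None suffix and one forward scan for the first None, computing the delay in closed form; it also keeps a running max instead of collecting a list.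
import Mathlib
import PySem

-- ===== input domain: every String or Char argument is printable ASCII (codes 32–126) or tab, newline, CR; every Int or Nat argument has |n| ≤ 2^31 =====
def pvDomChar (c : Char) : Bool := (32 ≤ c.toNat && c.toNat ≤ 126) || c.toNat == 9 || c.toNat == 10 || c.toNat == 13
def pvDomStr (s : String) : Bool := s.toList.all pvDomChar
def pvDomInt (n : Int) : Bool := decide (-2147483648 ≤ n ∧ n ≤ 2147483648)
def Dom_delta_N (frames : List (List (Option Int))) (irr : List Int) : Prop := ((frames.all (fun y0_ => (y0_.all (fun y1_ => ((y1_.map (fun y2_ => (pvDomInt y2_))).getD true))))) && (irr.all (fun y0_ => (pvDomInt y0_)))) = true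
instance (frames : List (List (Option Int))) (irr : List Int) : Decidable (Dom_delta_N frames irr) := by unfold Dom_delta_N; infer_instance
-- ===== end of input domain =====

-- B replaces A's quadratic per-position forward search (re-scanning vals[n:] for every candidate n)
-- by one backward scan for the maximal constant suffix plus one forward scan for the first None (objective: faster).

-- ===== PORT A =====
-- the loop condition `vals[n] is not None and all(v == vals[n] for v in vals[n:])`
def conv_cond (vals : List (Option Int)) (n : Int) : Bool :=
  match (PySem.List.pyGet? vals n).getD none with
  | some x => (PySem.List.slice vals (some n) none).all (fun v => v == some x)
  | none => false

-- convergencia_posicion's body, acting on the column vals = [f[pos] for f in frames]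
def convergencia_body (vals : List (Option Int)) : Bool × Option Int × Option Int :=
  match vals.findIdx? (fun v => v.isNone) with
  | none => (true, some 0, some 0)
  | some n0 =>
    match (PySem.List.pyRange (n0 : Int) (vals.length : Int) 1).find? (conv_cond vals) with
    | some n => (true, some n, some (n - (n0 : Int)))
    | none => (false, none, none)

def convergencia_posicion (frames : List (List (Option Int))) (pos : Int) : Bool × Option Int × Option Int :=
  convergencia_body (frames.map (fun f => (PySem.List.pyGet? f pos).getD none))

-- body of A's `for i in range(len(frames[0]))` loop
def delta_N_step (frames : List (List (Option Int))) (irr : List Int) (ds : List Int) (i : Int) : List Int :=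
  if i ∈ irr then ds
  else match (convergencia_posicion frames i).2.2 with
    | some d => ds ++ [d]
    | none => ds

def delta_N (frames : List (List (Option Int))) (irr : List Int) : Int :=
  let ds := (PySem.List.pyRange 0 ((frames.headD []).length : Int) 1).foldl (delta_N_step frames irr) ([] : List Int)
  (PySem.List.max? ds (fun x => x)).getD 0

-- ===== PORT B =====
-- body of B's loop over the positions: backward scan (takeWhile on the reversed column) for the
-- maximal constant suffix, forward scan for the first None, delay in closed form, running max
def delta_N_alt_step (frames : List (List (Option Int))) (irr : List Int) (best : Int) (i : Nat) : Int :=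
  if (i : Int) ∈ irr then best
  else
    let vals := frames.map (fun g => (PySem.List.pyGet? g (i : Int)).getD none)
    match vals.getLast? with
    | some (some last) =>
      let k := (vals.reverse.takeWhile (fun v => v == some last)).length
      let m := vals.length - k
      let d : Int := (vals.findIdx? (fun v => v.isNone)).elim 0
        (fun n0 => if (m : Int) > (n0 : Int) then (m : Int) - (n0 : Int) else 0)
      if d > best then d else best
    | _ => best

def delta_N_alt (frames : List (List (Option Int))) (irr : List Int) : Int :=
  (List.range (frames.headD []).length).foldl (delta_N_alt_step frames irr) (0 : Int)

-- ===== PRECONDITION & SPEC =====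
-- Pre_ excludes exactly the inputs on which the Python raises IndexError: an empty frame list
-- (len(frames[0])), and ragged frames where some non-irrelevant position is out of range of some frame.
def Pre_delta_N (frames : List (List (Option Int))) (irr : List Int) : Prop :=
  frames ≠ [] ∧ ∀ f ∈ frames, ∀ j ∈ List.range (frames.headD []).length, ((j : Int) ∈ irr ∨ j < f.length)
instance (frames : List (List (Option Int))) (irr : List Int) : Decidable (Pre_delta_N frames irr) := by
  unfold Pre_delta_N; infer_instance

def pvWitness_delta_N : List (List (Option Int)) × List Int :=
  ([[some 1, none], [some 1, some 2], [some 1, some 2]], [5])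

def Spec_delta_N (frames : List (List (Option Int))) (irr : List Int) (out : Int) : Prop := out = delta_N_alt frames irr
instance (frames : List (List (Option Int))) (irr : List Int) (out : Int) : Decidable (Spec_delta_N frames irr out) := by unfold Spec_delta_N; infer_instance

-- ===== CLAIM (what is proved, stated in full; the proofs are below) =====
def Claim_equal_delta_N : Prop := ∀ (frames : List (List (Option Int))) (irr : List Int), Dom_delta_N frames irr → Pre_delta_N frames irr → Spec_delta_N frames irr (delta_N frames irr)

-- ===== LEMMAS AND PROOFS =====

-- proof-only reshaping of B's per-column computation as an Option: none = the column is skipped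
def colB (vals : List (Option Int)) : Option Int :=
  match vals.getLast? with
  | some (some last) =>
    some ((vals.findIdx? (fun v => v.isNone)).elim 0
      (fun n0 => if ((vals.length - (vals.reverse.takeWhile (fun v => v == some last)).length : Nat) : Int) > (n0 : Int)
                 then ((vals.length - (vals.reverse.takeWhile (fun v => v == some last)).length : Nat) : Int) - (n0 : Int) else 0))
  | _ => none

lemma colB_nonneg (vals : List (Option Int)) (d : Int) (h : colB vals = some d) : 0 ≤ d := by
  unfold colB at h
  cases hgl : vals.getLast? with
  | none => simp [hgl] at h
  | some o =>
    cases o with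
    | none => simp [hgl] at h
    | some x =>
      simp only [hgl] at h
      cases hf : vals.findIdx? (fun v => v.isNone) with
      | none => simp [hf] at h; omega
      | some n0 => simp [hf] at h; split at h <;> omega

lemma take_all_eq_decide_le {α : Type} (p : α → Bool) :
    ∀ (l : List α) (j : Nat), j ≤ l.length → ((l.take j).all p = decide (j ≤ (l.takeWhile p).length)) := by
  intro l
  induction l with
  | nil => intro j hj; simp at hj; subst hj; simp
  | cons x t ih =>
    intro j hj
    cases j with
    | zero => simp
    | succ j =>
      cases hp : p x with
      | true => simp [hp, ih j (by simpa using hj)]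
      | false => simp [hp]

lemma drop_all_eq_decide (vals : List (Option Int)) (q : Option Int → Bool) (n : Nat) (hn : n ≤ vals.length) :
    (vals.drop n).all q = decide (vals.length - (vals.reverse.takeWhile q).length ≤ n) := by
  have h1 : (vals.drop n).all q = (vals.reverse.take (vals.length - n)).all q := by
    rw [← List.all_reverse, List.reverse_drop]
  have hk : (vals.reverse.takeWhile q).length ≤ vals.length := by
    simpa using (List.takeWhile_sublist q (l := vals.reverse)).length_le
  rw [h1, take_all_eq_decide_le q vals.reverse (vals.length - n) (by simp)]
  exact decide_eq_decide.mpr (by omega)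

lemma last_mem_drop (vals : List (Option Int)) (l : Option Int)
    (hx : vals.getLast? = some l) (n : Nat) (hn : n < vals.length) : l ∈ vals.drop n := by
  apply List.mem_of_getLast? (l := vals.drop n)
  rw [List.getLast?_drop, if_neg (by omega), hx]

lemma cond_eq_of_last_some (vals : List (Option Int)) (x : Int)
    (hx : vals.getLast? = some (some x)) (n : Nat) (hn : n < vals.length) :
    conv_cond vals (n : Int) = (vals.drop n).all (fun v => v == some x) := by
  unfold conv_cond
  rw [PySem.List.pyGet?_natCast, List.getElem?_eq_getElem hn, Option.getD_some,
    PySem.List.slice_from_natCast]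
  have hd : vals.drop n = vals[n] :: vals.drop (n + 1) := List.drop_eq_getElem_cons hn
  cases h : vals[n] with
  | none =>
    show false = (vals.drop n).all (fun v => v == some x)
    rw [hd, h]
    simp
  | some x' =>
    show (vals.drop n).all (fun v => v == some x') = (vals.drop n).all (fun v => v == some x)
    by_cases hxx : x' = x
    · subst hxx; rfl
    · have hrhs : (vals.drop n).all (fun v => v == some x) = false := by
        rw [hd, h, List.all_cons]
        simp [hxx]
      have hlhs : (vals.drop n).all (fun v => v == some x') = false := by
        apply Bool.eq_false_iff.mpr
        intro hall
        have hmem : (some x : Option Int) ∈ vals.drop n := last_mem_drop vals _ hx n hn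
        have := List.all_eq_true.mp hall _ hmem
        simp at this
        exact hxx this.symm
      rw [hlhs, hrhs]

lemma cond_false_of_last_none (vals : List (Option Int))
    (hx : vals.getLast? = some none) (n : Nat) (hn : n < vals.length) :
    conv_cond vals (n : Int) = false := by
  unfold conv_cond
  rw [PySem.List.pyGet?_natCast, List.getElem?_eq_getElem hn, Option.getD_some,
    PySem.List.slice_from_natCast]
  cases h : vals[n] with
  | none => rfl
  | some x' =>
    show (vals.drop n).all (fun v => v == some x') = false
    apply Bool.eq_false_iff.mpr
    intro hall
    have hmem : (none : Option Int) ∈ vals.drop n := last_mem_drop vals _ hx n hn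
    have := List.all_eq_true.mp hall _ hmem
    simp at this

lemma k_pos (vals : List (Option Int)) (x : Int) (hx : vals.getLast? = some (some x)) :
    1 ≤ (vals.reverse.takeWhile (fun v => v == some x)).length := by
  obtain ⟨ys, rfl⟩ := List.getLast?_eq_some_iff.mp hx
  simp

lemma find?_char (vals : List (Option Int)) (x : Int) (n0 : Nat)
    (hx : vals.getLast? = some (some x)) (hn0 : n0 < vals.length) :
    (PySem.List.pyRange (n0 : Int) (vals.length : Int) 1).find? (conv_cond vals)
      = some (max (n0 : Int) ((vals.length - (vals.reverse.takeWhile (fun v => v == some x)).length : Nat) : Int)) := by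
  set k := (vals.reverse.takeWhile (fun v => v == some x)).length with hkdef
  have hk1 : 1 ≤ k := k_pos vals x hx
  have hk2 : k ≤ vals.length := by
    simpa using (List.takeWhile_sublist (l := vals.reverse) (fun v => v == some x)).length_le
  set L := vals.length with hLdef
  set m := L - k with hmdef
  set M := max n0 m with hMdef
  have hML : M < L := by omega
  have hpt : ∀ (j : Nat), j < L → conv_cond vals (j : Int) = decide (m ≤ j) := by
    intro j hj
    rw [cond_eq_of_last_some vals x hx j hj, drop_all_eq_decide vals _ j (le_of_lt hj)]
  rw [PySem.List.pyRange_one_append (n0 : Int) (M : Int) (L : Int)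
      (by exact_mod_cast Nat.le_max_left n0 m) (by exact_mod_cast le_of_lt hML),
    List.find?_append]
  have hleft : (PySem.List.pyRange (n0 : Int) (M : Int) 1).find? (conv_cond vals) = none := by
    apply List.find?_eq_none.mpr
    intro nI hmem
    obtain ⟨hlo, hhi⟩ := PySem.List.mem_pyRange_one.mp hmem
    have hnn : 0 ≤ nI := le_trans (by exact_mod_cast Nat.zero_le n0) hlo
    obtain ⟨j, rfl⟩ := Int.eq_ofNat_of_zero_le hnn
    have hj1 : n0 ≤ j := by exact_mod_cast hlo
    have hj2 : j < M := by exact_mod_cast hhi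
    rw [hpt j (by omega)]
    simp only [decide_eq_true_eq]
    omega
  have hcM : conv_cond vals (M : Int) = true := by
    rw [hpt M hML]; simp [hMdef]
  rw [hleft,
    PySem.List.pyRange_one_cons (show (M : Int) < (L : Int) by exact_mod_cast hML),
    List.find?_cons_of_pos hcM, Option.none_or]
  congr 1
  rw [hMdef]
  push_cast [Nat.cast_max]
  rfl

lemma A_col (vals : List (Option Int)) (hne : vals ≠ []) :
    (convergencia_body vals).2.2 = colB vals := by
  unfold convergencia_body colB
  cases hgl : vals.getLast? with
  | none => exact absurd (List.getLast?_eq_none_iff.mp hgl) hne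
  | some o =>
    cases o with
    | none =>
      cases hf : vals.findIdx? (fun v => v.isNone) with
      | none =>
        exfalso
        have hmem : (none : Option Int) ∈ vals := List.mem_of_getLast? hgl
        have := List.findIdx?_eq_none_iff.mp hf _ hmem
        simp at this
      | some n0 =>
        dsimp only
        have hfind : (PySem.List.pyRange (n0 : Int) (vals.length : Int) 1).find? (conv_cond vals) = none := by
          apply List.find?_eq_none.mpr
          intro nI hmem
          obtain ⟨hlo, hhi⟩ := PySem.List.mem_pyRange_one.mp hmem
          have hnn : 0 ≤ nI := le_trans (by exact_mod_cast Nat.zero_le n0) hlo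
          obtain ⟨j, rfl⟩ := Int.eq_ofNat_of_zero_le hnn
          have hj : j < vals.length := by exact_mod_cast hhi
          simp [cond_false_of_last_none vals hgl j hj]
        simp [hfind]
    | some x =>
      cases hf : vals.findIdx? (fun v => v.isNone) with
      | none => rfl
      | some n0 =>
        dsimp only
        have hn0 : n0 < vals.length := (List.findIdx?_eq_some_iff_findIdx_eq.mp hf).1
        rw [find?_char vals x n0 hgl hn0]
        have hk2 : (vals.reverse.takeWhile (fun v => v == some x)).length ≤ vals.length := by
          simpa using (List.takeWhile_sublist (l := vals.reverse) (fun v => v == some x)).length_le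
        simp only [Option.elim_some]
        congr 1
        split
        · omega
        · omega

lemma max?_append_getD (ds : List Int) (d : Int) (hd : 0 ≤ d) :
    (PySem.List.max? (ds ++ [d]) (fun y => y)).getD 0 = max ((PySem.List.max? ds (fun y => y)).getD 0) d := by
  cases ds with
  | nil =>
    have h1 : PySem.List.max? ([] ++ [d]) (fun y : Int => y) = some d := by
      simpa using PySem.List.max?_id_cons (x := d) (t := [])
    have h2 : PySem.List.max? ([] : List Int) (fun y : Int => y) = none := rfl
    rw [h1, h2]; simp; omega
  | cons a t =>
    rw [List.cons_append, PySem.List.max?_id_cons, PySem.List.max?_id_cons]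
    simp [List.foldl_append]

lemma stepB_eq (frames : List (List (Option Int))) (irr : List Int) (b : Int) (i : Nat) :
    delta_N_alt_step frames irr b i =
      if (i : Int) ∈ irr then b
      else match colB (frames.map (fun g => (PySem.List.pyGet? g (i : Int)).getD none)) with
        | some d => max b d
        | none => b := by
  unfold delta_N_alt_step colB
  by_cases hi : (i : Int) ∈ irr
  · simp [hi]
  · simp only [hi, if_false]
    cases hgl : (frames.map (fun g => (PySem.List.pyGet? g (i : Int)).getD none)).getLast? with
    | none => simp
    | some o =>
      cases o with
      | none => simp
      | some last =>
        dsimp only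
        generalize ((frames.map (fun g => (PySem.List.pyGet? g (i : Int)).getD none)).findIdx? (fun v => v.isNone)).elim 0 _ = d
        omega

lemma fold_inv (frames : List (List (Option Int))) (irr : List Int) (hne : frames ≠ []) :
    ∀ (cols : List Nat) (ds : List Int) (b : Int),
      (∀ d ∈ ds, 0 ≤ d) → ((PySem.List.max? ds (fun y => y)).getD 0 = b) →
      (PySem.List.max? (cols.foldl (fun (ds : List Int) (i : Nat) => delta_N_step frames irr ds (i : Int)) ds) (fun y => y)).getD 0
        = cols.foldl (delta_N_alt_step frames irr) b := by
  intro cols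
  induction cols with
  | nil => intro ds b h1 h2; exact h2
  | cons i cs ih =>
    intro ds b h1 h2
    simp only [List.foldl_cons]
    rw [stepB_eq]
    by_cases hi : ((i : Nat) : Int) ∈ irr
    · simp only [delta_N_step, hi, if_true]
      exact ih ds b h1 h2
    · have hvne : frames.map (fun g => (PySem.List.pyGet? g (i : Int)).getD none) ≠ [] := by
        simpa using hne
      have hA : (convergencia_posicion frames (i : Int)).2.2
          = colB (frames.map (fun g => (PySem.List.pyGet? g (i : Int)).getD none)) := by
        unfold convergencia_posicion
        exact A_col _ hvne
      cases hc : colB (frames.map (fun g => (PySem.List.pyGet? g (i : Int)).getD none)) with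
      | none =>
        simp only [delta_N_step, hi, if_false, hA, hc]
        exact ih ds b h1 h2
      | some d =>
        simp only [delta_N_step, hi, if_false, hA, hc]
        apply ih (ds ++ [d]) (max b d)
        · intro y hy
          rcases List.mem_append.mp hy with hy | hy
          · exact h1 y hy
          · simp at hy; subst hy; exact colB_nonneg _ _ hc
        · rw [max?_append_getD ds d (colB_nonneg _ _ hc), h2]

-- ===== VERDICT (by name: the statement is the Claim_ definition above) =====
theorem delta_N_spec : Claim_equal_delta_N := by
  intro frames irr _ hpre
  unfold Spec_delta_N
  have h0 : delta_N frames irr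
      = (PySem.List.max? ((PySem.List.pyRange 0 (((frames.headD []).length : Nat) : Int) 1).foldl
          (delta_N_step frames irr) ([] : List Int)) (fun x => x)).getD 0 := rfl
  have hW : PySem.List.pyRange 0 (((frames.headD []).length : Nat) : Int) 1
      = (List.range (frames.headD []).length).map (fun k => ((k : Nat) : Int)) := by
    rw [PySem.List.pyRange_one]
    norm_num
  have h1 : delta_N_alt frames irr
      = (List.range (frames.headD []).length).foldl (delta_N_alt_step frames irr) 0 := rfl
  rw [h0, h1, hW, List.foldl_map]
  exact fold_inv frames irr hpre.1 (List.range (frames.headD []).length) [] 0 (by simp) rfl
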